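-- pv_equiv track=rewrite | github.com/stOneskull/godschat | godschat.py | make_sessions_list
-- ===== SOURCE A (Python) =====
-- def make_sessions_list(loglist):
--     sessionlines = []
--     sessionslist = []
--
--     for line in loglist:
--         if "START SESSION" in line and sessionlines:
--             sessionslist.append(sessionlines)
--             sessionlines = []
--
--         sessionlines.append(line)
--
--     if sessionlines:
--         sessionslist.append(sessionlines)
--
--     return sessionslist
-- ===== SOURCE B (Python) =====
-- def make_sessions_list(loglist):
--     lst = list(loglist)
--
--     def go(xs):
--         # xs is a non-empty suffix whose head starts a session group
--         if not xs:
--             return []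
--         k = 1
--         while k < len(xs) and "START SESSION" not in xs[k]:
--             k += 1
--         return [xs[:k]] + go(xs[k:])
--
--     return go(lst)
-- ===== Notes on version B (the rewrite author's own statement) =====
-- stated objective: alternative
-- what changed: Replaces A's single accumulate-and-flush pass (current-group buffer flushed on each 'START SESSION' marker, plus a final flush) by a top-down recursive decomposition: take the head line, scan forward to the next marker, emit that slice as one group, and recurse on the rest.
import Mathlib
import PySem

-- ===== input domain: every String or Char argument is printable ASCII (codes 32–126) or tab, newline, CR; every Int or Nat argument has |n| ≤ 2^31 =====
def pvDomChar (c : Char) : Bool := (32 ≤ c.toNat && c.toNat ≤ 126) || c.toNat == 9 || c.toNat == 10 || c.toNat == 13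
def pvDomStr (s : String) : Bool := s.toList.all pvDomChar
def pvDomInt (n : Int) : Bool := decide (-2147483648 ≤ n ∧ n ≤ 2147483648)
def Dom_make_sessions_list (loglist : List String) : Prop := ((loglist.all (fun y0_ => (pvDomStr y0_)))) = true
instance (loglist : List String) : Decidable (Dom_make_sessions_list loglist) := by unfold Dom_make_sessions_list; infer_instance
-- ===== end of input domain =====

-- B replaces A's accumulate-and-flush single pass by a top-down recursion (head line + scan to next
-- marker = one group, recurse on the rest); same cost, different decomposition (objective: alternative).

-- ===== PORT A =====
-- the for-loop's state: (sessionlines, sessionslist)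
def mslLoopA (xs : List String) (cur : List String) (acc : List (List String)) :
    List String × List (List String) :=
  match xs with
  | [] => (cur, acc)
  | line :: rest =>
    if PySem.Str.isIn "START SESSION" line && !cur.isEmpty then
      mslLoopA rest ([] ++ [line]) (acc ++ [cur])
    else
      mslLoopA rest (cur ++ [line]) acc

def make_sessions_list (loglist : List String) : List (List String) :=
  let r := mslLoopA loglist [] []
  if r.1.isEmpty then r.2 else r.2 ++ [r.1]

-- ===== PORT B =====
-- go xs: emit the head line plus everything up to the next 'START SESSION' marker, recurse on the rest
def mslGoB : List String → List (List String)
  | [] => []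
  | x :: rest =>
    (x :: rest.takeWhile (fun l => !PySem.Str.isIn "START SESSION" l)) ::
      mslGoB (rest.dropWhile (fun l => !PySem.Str.isIn "START SESSION" l))
termination_by xs => xs.length
decreasing_by
  exact Nat.lt_succ_of_le (List.length_dropWhile_le _ rest)

def make_sessions_list_alt (loglist : List String) : List (List String) :=
  mslGoB loglist

-- ===== PRECONDITION & SPEC =====
def Spec_make_sessions_list (loglist : List String) (out : List (List String)) : Prop := out = make_sessions_list_alt loglist
instance (loglist : List String) (out : List (List String)) : Decidable (Spec_make_sessions_list loglist out) := by unfold Spec_make_sessions_list; infer_instance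

-- ===== CLAIM (what is proved, stated in full; the proofs are below) =====
def Claim_equal_make_sessions_list : Prop := ∀ (loglist : List String), Dom_make_sessions_list loglist → Spec_make_sessions_list loglist (make_sessions_list loglist)

-- ===== LEMMAS AND PROOFS =====

-- proof-side copies of the two recursions with the marker test abstracted to p
-- (keeps the pysem simp set from rewriting the concrete substring test mid-proof)
def loopG (p : String → Bool) (xs : List String) (cur : List String) (acc : List (List String)) :
    List String × List (List String) :=
  match xs with
  | [] => (cur, acc)
  | line :: rest =>
    if p line && !cur.isEmpty then loopG p rest ([] ++ [line]) (acc ++ [cur])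
    else loopG p rest (cur ++ [line]) acc

def goG (p : String → Bool) : List String → List (List String)
  | [] => []
  | x :: rest =>
    (x :: rest.takeWhile (fun l => !p l)) :: goG p (rest.dropWhile (fun l => !p l))
termination_by xs => xs.length
decreasing_by
  exact Nat.lt_succ_of_le (List.length_dropWhile_le _ rest)

lemma mslLoopA_eq (xs : List String) : ∀ cur acc,
    mslLoopA xs cur acc = loopG (fun l => PySem.Str.isIn "START SESSION" l) xs cur acc := by
  induction xs with
  | nil => intro cur acc; rfl
  | cons x rest ih =>
    intro cur acc
    simp only [mslLoopA, loopG]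
    split <;> exact ih _ _

lemma mslGoB_eq (xs : List String) :
    mslGoB xs = goG (fun l => PySem.Str.isIn "START SESSION" l) xs := by
  induction xs using mslGoB.induct with
  | case1 => rw [mslGoB, goG]
  | case2 x rest ih => rw [mslGoB, goG, ih]

-- A's loop from a non-empty current group, followed by the final flush, produces: the current group
-- extended up to the next marker, then B's groups of the remaining suffix.
lemma loopG_spec (p : String → Bool) (xs : List String) : ∀ (cur : List String) (acc : List (List String)),
    cur ≠ [] →
    (let r := loopG p xs cur acc; if r.1.isEmpty then r.2 else r.2 ++ [r.1]) =
      acc ++ ((cur ++ xs.takeWhile (fun l => !p l)) :: goG p (xs.dropWhile (fun l => !p l))) := by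
  induction xs with
  | nil =>
    intro cur acc hcur
    simp [loopG, goG, hcur]
  | cons x rest ih =>
    intro cur acc hcur
    have hce : cur.isEmpty = false := by simp [List.isEmpty_eq_false_iff, hcur]
    by_cases hb : p x = true
    · simp only [loopG, hb, hce, Bool.not_false, Bool.and_self, if_true,
        List.takeWhile_cons, List.dropWhile_cons, Bool.not_true, Bool.false_eq_true,
        if_false]
      rw [ih ([] ++ [x]) (acc ++ [cur]) (by simp), goG]
      simp
    · have hb' : p x = false := by simpa using hb
      simp only [loopG, hb', Bool.false_and, Bool.false_eq_true, if_false,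
        List.takeWhile_cons, List.dropWhile_cons, Bool.not_false, if_true]
      rw [ih (cur ++ [x]) acc (by simp)]
      simp

-- ===== VERDICT (by name: the statement is the Claim_ definition above) =====
theorem make_sessions_list_spec : Claim_equal_make_sessions_list := by
  intro loglist _
  unfold Spec_make_sessions_list make_sessions_list make_sessions_list_alt
  rw [mslGoB_eq, mslLoopA_eq]
  cases loglist with
  | nil => rw [goG]; simp [loopG]
  | cons x rest =>
    have h0 : loopG (fun l => PySem.Str.isIn "START SESSION" l) (x :: rest) [] [] =
        loopG (fun l => PySem.Str.isIn "START SESSION" l) rest ([] ++ [x]) [] := by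
      simp only [loopG, List.isEmpty_nil, Bool.not_true, Bool.and_false, Bool.false_eq_true,
        if_false]
    rw [h0, loopG_spec _ rest ([] ++ [x]) [] (by simp), goG]
    simp
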